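-- pv_equiv track=rewrite | github.com/Johnson-Research-Group/TETB_GRAPHENE | uncertainty_quantification/BLG_MODEL_KLIFF.py | _get_specie_pairs_to_param_index_map
-- ===== SOURCE A (Python) =====
-- from typing import Dict, List, Optional, Tuple
--
-- def _get_specie_pairs_to_param_index_map(
--     species: List[str],
-- ) -> Dict[Tuple[str, str], int]:
--     """
--     Return a map from a tuple of two species to the index of the corresponding
--     parameter in the parameter array.
--
--     For example, if the supported species are ["A", "B", "C"], then the map will be
--     {(A, A): 0, (A, B): 1, (B, A): 1, (A, C): 2, (C, A): 2,
--     (B, B): 3, (B, C): 4, (C, B): 4,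
--     (C, C): 5}.
--     """
--     n = len(species)
--
--     speices_to_param_index_map = {}
--
--     index = 0
--     for i in range(n):
--         si = species[i]
--         for j in range(i, n):
--             sj = species[j]
--             speices_to_param_index_map[(si, sj)] = index
--             if i != j:
--                 speices_to_param_index_map[(sj, si)] = index
--
--             index += 1
--
--     return speices_to_param_index_map
-- ===== SOURCE B (Python) =====
-- def _get_specie_pairs_to_param_index_map(species):
--     # Built back-to-front from suffix maps: the map for a suffix is the head's row
--     # (indices 0..len(suffix)-1) merged with the previous suffix's map, all of whose
--     # indices are shifted by the suffix length.
--     m = {}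
--     tail = []
--     for s0 in reversed(species):
--         new = {(s0, s0): 0}
--         for k, s in enumerate(tail, start=1):
--             new[(s0, s)] = k
--             new[(s, s0)] = k
--         for pair, idx in m.items():
--             new[pair] = idx + len(tail) + 1
--         m = new
--         tail = [s0] + tail
--     return m
-- ===== Notes on version B (the rewrite author's own statement) =====
-- stated objective: alternative
-- what changed: Replaces the nested index loops with a running counter by a back-to-front computation over suffix maps: each step builds the head's row at indices 0..len(suffix)-1 and merges in the previously computed suffix map with all indices shifted by the suffix length.
import Mathlib
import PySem

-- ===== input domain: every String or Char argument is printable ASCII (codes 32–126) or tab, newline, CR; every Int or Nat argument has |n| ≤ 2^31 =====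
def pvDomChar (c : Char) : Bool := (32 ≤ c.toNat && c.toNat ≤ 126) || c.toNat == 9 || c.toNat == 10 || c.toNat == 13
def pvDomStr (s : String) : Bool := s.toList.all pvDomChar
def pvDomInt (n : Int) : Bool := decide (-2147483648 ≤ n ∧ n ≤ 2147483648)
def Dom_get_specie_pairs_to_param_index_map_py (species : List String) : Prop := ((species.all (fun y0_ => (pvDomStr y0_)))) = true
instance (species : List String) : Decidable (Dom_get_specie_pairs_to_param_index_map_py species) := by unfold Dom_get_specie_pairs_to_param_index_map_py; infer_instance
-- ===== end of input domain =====

-- B replaces A's nested index loops with a running counter by a back-to-front computation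
-- over suffix maps: each step builds the head's row at indices 0..len(suffix)-1 and merges
-- in the previous suffix map with all indices shifted by the suffix length (objective: alternative).

-- ===== PORT A =====
-- inner loop body of A: writes (si,sj) (and (sj,si) when i != j) at the running index
-- (pyGetD's default "" is never used: j always indexes inside species)
def pvAinner (species : List String) (i : Int) (si : String)
    (st : PySem.Dict (String × String) Int × Int) (j : Int) :
    PySem.Dict (String × String) Int × Int :=
  let d := st.1
  let index := st.2
  let sj := PySem.List.pyGetD species j ""
  let d := d.insert (si, sj) index
  let d := if i ≠ j then d.insert (sj, si) index else d
  (d, index + 1)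

-- outer loop body of A: for j in range(i, n)
def pvAouter (species : List String) (n : Int)
    (st : PySem.Dict (String × String) Int × Int) (i : Int) :
    PySem.Dict (String × String) Int × Int :=
  let si := PySem.List.pyGetD species i ""
  (PySem.List.pyRange i n).foldl (pvAinner species i si) st

def get_specie_pairs_to_param_index_map_py (species : List String) : List (String × String × Int) :=
  let n : Int := species.length
  let res := (PySem.List.pyRange 0 n).foldl (pvAouter species n) (PySem.Dict.empty, 0)
  res.1.items.map (fun p => (p.1.1, p.1.2, p.2))

-- ===== PORT B =====
-- body of B's first loop: for k, s in enumerate(rest, start=1): m[(s0,s)] = k; m[(s,s0)] = k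
def pvBpair (s0 : String) (m : PySem.Dict (String × String) Int) (q : Int × String) :
    PySem.Dict (String × String) Int :=
  (m.insert (s0, q.2) q.1).insert (q.2, s0) q.1

-- body of B's outer loop: for s0 in reversed(species), state (m, tail)
def pvBStep (st : PySem.Dict (String × String) Int × List String) (s0 : String) :
    PySem.Dict (String × String) Int × List String :=
  let new := PySem.Dict.empty.insert (s0, s0) 0
  let new := (PySem.List.enumerate st.2 1).foldl (pvBpair s0) new
  let new := st.1.items.foldl (fun d p => d.insert p.1 (p.2 + ((st.2.length : Int) + 1))) new
  (new, s0 :: st.2)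

def get_specie_pairs_to_param_index_map_py_alt (species : List String) : List (String × String × Int) :=
  (species.reverse.foldl pvBStep (PySem.Dict.empty, [])).1.items.map (fun p => (p.1.1, p.1.2, p.2))

-- ===== PRECONDITION & SPEC =====
def Spec_get_specie_pairs_to_param_index_map_py (species : List String) (out : List (String × String × Int)) : Prop := out = get_specie_pairs_to_param_index_map_py_alt species
instance (species : List String) (out : List (String × String × Int)) : Decidable (Spec_get_specie_pairs_to_param_index_map_py species out) := by unfold Spec_get_specie_pairs_to_param_index_map_py; infer_instance

-- ===== CLAIM (what is proved, stated in full; the proofs are below) =====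
def Claim_equal_get_specie_pairs_to_param_index_map_py : Prop := ∀ (species : List String), Dom_get_specie_pairs_to_param_index_map_py species → Spec_get_specie_pairs_to_param_index_map_py species (get_specie_pairs_to_param_index_map_py species)

-- ===== LEMMAS AND PROOFS =====

-- the suffix map B's loop carries: pvBAux l is B's state after consuming the suffix l
def pvBAux : List String → PySem.Dict (String × String) Int
  | [] => PySem.Dict.empty
  | s0 :: rest =>
      (pvBAux rest).items.foldl
        (fun d p => d.insert p.1 (p.2 + ((rest.length : Int) + 1)))
        ((PySem.List.enumerate rest 1).foldl (pvBpair s0)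
          (PySem.Dict.empty.insert (s0, s0) 0))

-- B's loop over the reversed list computes exactly the suffix maps
theorem pv_rev_fold : ∀ (l : List String),
    l.reverse.foldl pvBStep (PySem.Dict.empty, []) = (pvBAux l, l) := by
  intro l
  induction l with
  | nil => rfl
  | cons x l ih =>
      rw [List.reverse_cons, List.foldl_append, ih]
      rfl

-- the triangular offset of row k as reached by A's running counter
def pvTri (k : Nat) (n : Int) : Int :=
  (k : Int) * n - PySem.Int.floordiv ((k : Int) * ((k : Int) - 1)) 2

-- both orientations of (si, x) for each x of tail, at consecutive indices from v
def pvPairsFrom (si : String) : List String → Int → List ((String × String) × Int)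
  | [], _ => []
  | x :: xs, v => ((si, x), v) :: ((x, si), v) :: pvPairsFrom si xs (v + 1)

-- the full entry sequence from row k on, tail = species.drop k (A's write order)
def pvRows (species : List String) : Nat → List String → List ((String × String) × Int)
  | _, [] => []
  | k, si :: rest =>
      (((si, si), pvTri k species.length) :: pvPairsFrom si rest (pvTri k species.length + 1))
        ++ pvRows species (k + 1) rest

def pvIns (d : PySem.Dict (String × String) Int) (p : (String × String) × Int) :
    PySem.Dict (String × String) Int := d.insert p.1 p.2

-- add c to the value component of an entry
def pvShift (c : Int) (p : (String × String) × Int) : (String × String) × Int := (p.1, p.2 + c)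

-- the entry sequence B's recursion corresponds to: head row from 0, tail rows shifted by n
def pvRowsRec : List String → List ((String × String) × Int)
  | [] => []
  | s0 :: rest =>
      ((s0, s0), 0) :: pvPairsFrom s0 rest 1
        ++ (pvRowsRec rest).map (pvShift ((rest.length : Int) + 1))

theorem pv_tri_step (k n : Nat) (h : k < n) :
    pvTri k n + ((n : Int) - (k : Int)) = pvTri (k + 1) n := by
  unfold pvTri
  have e1 : ((k : Int) * ((k : Int) - 1)) = ((k * (k - 1) : Nat) : Int) := by
    cases k with
    | zero => simp
    | succ m => push_cast [Nat.succ_sub_one]; ring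
  have e2 : (((k + 1 : Nat) : Int) * (((k + 1 : Nat) : Int) - 1)) = (((k + 1) * k : Nat) : Int) := by
    push_cast; ring
  have f1 : PySem.Int.floordiv ((k * (k - 1) : Nat) : Int) 2 = ((k * (k - 1) / 2 : Nat) : Int) := by
    exact_mod_cast PySem.Int.floordiv_natCast (k * (k - 1)) 2
  have f2 : PySem.Int.floordiv (((k + 1) * k : Nat) : Int) 2 = (((k + 1) * k / 2 : Nat) : Int) := by
    exact_mod_cast PySem.Int.floordiv_natCast ((k + 1) * k) 2
  rw [e1, e2, f1, f2]
  have hdiv : ((k + 1) * k) / 2 = (k * (k - 1)) / 2 + k := by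
    have h2 : (k + 1) * k = k * (k - 1) + k * 2 := by
      cases k with
      | zero => rfl
      | succ m => simp; ring
    rw [h2, Nat.add_mul_div_right _ _ (by norm_num : 0 < 2)]
  push_cast [hdiv]
  ring

theorem pv_inner_eq (species : List String) (i : Nat) (si : String) :
    ∀ (tail : List String) (k : Nat), species.drop k = tail → i < k →
      ∀ (d : PySem.Dict (String × String) Int) (v : Int),
        (PySem.List.pyRange (k : Int) (species.length : Int)).foldl
            (pvAinner species (i : Int) si) (d, v)
          = ((pvPairsFrom si tail v).foldl pvIns d, v + tail.length) := by
  intro tail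
  induction tail with
  | nil =>
      intro k hk _ d v
      have hlen : species.length ≤ k := List.drop_eq_nil_iff.mp hk
      rw [PySem.List.pyRange_one_eq_nil (by exact_mod_cast hlen)]
      simp [pvPairsFrom]
  | cons x xs ih =>
      intro k hk hik d v
      have hlenk : species.length - k = xs.length + 1 := by
        have := congrArg List.length hk; simpa using this
      have hklt : k < species.length := by omega
      have hx : species[k]'hklt = x := by
        have h0 : (species.drop k)[0]'(by simp [hk]) = x := by simp [hk]
        simpa using h0
      have hdrop : species.drop (k + 1) = xs := by
        have h1 := congrArg (List.drop 1) hk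
        simpa [List.drop_drop, Nat.add_comm] using h1
      rw [PySem.List.pyRange_one_cons (by exact_mod_cast hklt)]
      simp only [List.foldl_cons]
      have hstep : pvAinner species (i : Int) si (d, v) (k : Int)
          = ((d.insert (si, x) v).insert (x, si) v, v + 1) := by
        have hne : ((i : Int) ≠ (k : Int)) := by
          intro hc; exact absurd (by exact_mod_cast hc : i = k) (by omega)
        simp [pvAinner, PySem.List.pyGetD_natCast, List.getElem?_eq_getElem hklt, hx, hne]
      rw [hstep, show ((k : Int) + 1) = (((k + 1 : Nat)) : Int) by push_cast; ring,
          ih (k + 1) hdrop (by omega) _ _]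
      simp [pvPairsFrom, pvIns]
      ring

theorem pv_row_eq (species : List String) (i : Nat) (h : i < species.length)
    (d : PySem.Dict (String × String) Int) (v : Int) :
    (PySem.List.pyRange (i : Int) (species.length : Int)).foldl
        (pvAinner species (i : Int) (species[i])) (d, v)
      = (((( species[i], species[i]), v) :: pvPairsFrom (species[i]) (species.drop (i + 1)) (v + 1)).foldl pvIns d,
         v + ((species.length : Int) - (i : Int))) := by
  rw [PySem.List.pyRange_one_cons (by exact_mod_cast h)]
  simp only [List.foldl_cons]
  have hstep : pvAinner species (i : Int) (species[i]) (d, v) (i : Int)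
      = (d.insert (species[i], species[i]) v, v + 1) := by
    simp [pvAinner, PySem.List.pyGetD_natCast, List.getElem?_eq_getElem h]
  rw [hstep, show ((i : Int) + 1) = (((i + 1 : Nat)) : Int) by push_cast; ring,
      pv_inner_eq species i (species[i]) (species.drop (i + 1)) (i + 1) rfl (by omega) _ _]
  simp only [Prod.mk.injEq]
  refine ⟨rfl, ?_⟩
  rw [List.length_drop, Nat.cast_sub (by omega : i + 1 ≤ species.length)]
  push_cast
  ring

theorem pv_outer_eq (species : List String) :
    ∀ (tail : List String) (k : Nat), species.drop k = tail → k + tail.length = species.length →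
      ∀ (d : PySem.Dict (String × String) Int),
        (PySem.List.pyRange (k : Int) (species.length : Int)).foldl
            (pvAouter species (species.length : Int)) (d, pvTri k species.length)
          = ((pvRows species k tail).foldl pvIns d, pvTri species.length species.length) := by
  intro tail
  induction tail with
  | nil =>
      intro k hk hlen d
      have hke : k = species.length := by simpa using hlen
      subst hke
      rw [PySem.List.pyRange_one_eq_nil (by omega)]
      simp [pvRows]
  | cons si rest ih =>
      intro k hk hlen d
      have hklt : k < species.length := by simp at hlen; omega
      have hx : species[k]'hklt = si := by
        have h0 : (species.drop k)[0]'(by simp [hk]) = si := by simp [hk]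
        simpa using h0
      have hdrop : species.drop (k + 1) = rest := by
        have h1 := congrArg (List.drop 1) hk
        simpa [List.drop_drop, Nat.add_comm] using h1
      rw [PySem.List.pyRange_one_cons (by exact_mod_cast hklt)]
      simp only [List.foldl_cons]
      have hout : pvAouter species (species.length : Int) (d, pvTri k species.length) (k : Int)
          = ((((species[k]'hklt, species[k]'hklt), pvTri k species.length)
                :: pvPairsFrom (species[k]'hklt) (species.drop (k + 1)) (pvTri k species.length + 1)).foldl pvIns d,
             pvTri k species.length + ((species.length : Int) - (k : Int))) := by
        show (PySem.List.pyRange (k : Int) (species.length : Int)).foldl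
            (pvAinner species (k : Int) (PySem.List.pyGetD species (k : Int) "")) _ = _
        rw [show PySem.List.pyGetD species (k : Int) "" = species[k]'hklt by
              simp [PySem.List.pyGetD_natCast, List.getElem?_eq_getElem hklt]]
        exact pv_row_eq species k hklt d (pvTri k species.length)
      rw [hout, pv_tri_step k species.length hklt,
          show ((k : Int) + 1) = (((k + 1 : Nat)) : Int) by push_cast; ring,
          ih (k + 1) hdrop (by simp at hlen ⊢; omega) _]
      simp only [pvRows, hx, hdrop, List.foldl_append]

-- shifting the values of a pvPairsFrom block shifts its starting index
theorem pv_pairs_shift (si : String) (tail : List String) :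
    ∀ (v c : Int), (pvPairsFrom si tail v).map (pvShift c) = pvPairsFrom si tail (v + c) := by
  induction tail with
  | nil => intro v c; simp [pvPairsFrom]
  | cons x xs ih =>
      intro v c
      simp [pvPairsFrom, pvShift, ih (v + 1) c, add_right_comm]

-- two value shifts compose
theorem pv_shift_shift (L : List ((String × String) × Int)) (a b : Int) :
    (L.map (pvShift a)).map (pvShift b) = L.map (pvShift (a + b)) := by
  rw [List.map_map]
  refine List.map_congr_left (fun p _ => ?_)
  simp [pvShift, Function.comp, add_assoc]

theorem pv_shift_zero (L : List ((String × String) × Int)) : L.map (pvShift 0) = L := by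
  refine (List.map_congr_left (fun p _ => ?_)).trans (List.map_id L)
  simp [pvShift]

-- A's entry sequence from row k is B's recursive entry sequence for the tail, shifted
theorem pv_rows_rec (species : List String) :
    ∀ (tail : List String) (k : Nat), species.drop k = tail → k + tail.length = species.length →
      pvRows species k tail = (pvRowsRec tail).map (pvShift (pvTri k species.length)) := by
  intro tail
  induction tail with
  | nil => intro k _ _; simp [pvRows, pvRowsRec]
  | cons si rest ih =>
      intro k hk hlen
      have hdrop : species.drop (k + 1) = rest := by
        have h1 := congrArg (List.drop 1) hk
        simpa [List.drop_drop, Nat.add_comm] using h1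
      have hklt : k < species.length := by simp at hlen; omega
      have hn : ((rest.length : Int) + 1) + pvTri k species.length
          = pvTri (k + 1) species.length := by
        rw [← pv_tri_step k species.length hklt]
        have : (species.length : Int) - (k : Int) = (rest.length : Int) + 1 := by
          simp at hlen; omega
        rw [this]; ring
      simp only [pvRows, pvRowsRec, List.map_cons, List.map_append, pvShift,
        pv_pairs_shift, pv_shift_shift, hn, ih (k + 1) hdrop (by simp at hlen ⊢; omega)]
      rw [zero_add, Int.add_comm 1]

-- B's first loop is a pvIns-fold over the head row's off-diagonal entries
theorem pv_enum_fold (s0 : String) :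
    ∀ (tail : List String) (v : Int) (m : PySem.Dict (String × String) Int),
      (PySem.List.enumerate tail v).foldl (pvBpair s0) m
        = (pvPairsFrom s0 tail v).foldl pvIns m := by
  intro tail
  induction tail with
  | nil => intro v m; simp [PySem.List.enumerate_nil, pvPairsFrom]
  | cons x xs ih =>
      intro v m
      rw [PySem.List.enumerate_cons]
      simp only [List.foldl_cons, pvPairsFrom]
      rw [ih (v + 1)]
      rfl

-- inserting at a key already present (a value update in place) commutes with any other insert
theorem pv_insert_comm (d : PySem.Dict (String × String) Int)
    (k p1 : String × String) (hc : d.contains k = true) (hne : p1 ≠ k)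
    (w p2 : Int) :
    (d.insert p1 p2).insert k w = (d.insert k w).insert p1 p2 := by
  apply PySem.Dict.ext
  have hck : (d.insert p1 p2).contains k = true := by
    rw [PySem.Dict.contains_insert d p1 k p2, hc, Bool.or_true]
  by_cases hp : d.contains p1 = true
  · have hcp : (d.insert k w).contains p1 = true := by
      rw [PySem.Dict.contains_insert d k p1 w, hp, Bool.or_true]
    rw [PySem.Dict.items_insert_of_contains (d.insert p1 p2) w hck,
        PySem.Dict.items_insert_of_contains d p2 hp,
        PySem.Dict.items_insert_of_contains (d.insert k w) p2 hcp,
        PySem.Dict.items_insert_of_contains d w hc,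
        List.map_map, List.map_map]
    refine List.map_congr_left (fun q _ => ?_)
    by_cases h1 : q.1 = p1
    · have h2 : q.1 ≠ k := by rw [h1]; exact hne
      simp [Function.comp, h1, hne]
    · by_cases h2 : q.1 = k
      · simp [Function.comp, h2, Ne.symm hne]
      · simp [Function.comp, h1, h2]
  · have hp' : d.contains p1 = false := by simpa using hp
    have hcp : (d.insert k w).contains p1 = false := by
      rw [PySem.Dict.contains_insert d k p1 w, hp']
      simp [hne]
    rw [PySem.Dict.items_insert_of_contains (d.insert p1 p2) w hck,
        PySem.Dict.items_insert_of_not_contains d p2 hp',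
        PySem.Dict.items_insert_of_not_contains (d.insert k w) p2 hcp,
        PySem.Dict.items_insert_of_contains d w hc,
        List.map_append]
    simp [hne]

-- a value update at a present key can be postponed past inserts of other keys
theorem pv_fold_insert (k : String × String) :
    ∀ (L : List ((String × String) × Int)), (∀ p ∈ L, p.1 ≠ k) →
      ∀ (m : PySem.Dict (String × String) Int), m.contains k = true → ∀ (w : Int),
        (L.foldl pvIns m).insert k w = L.foldl pvIns (m.insert k w) := by
  intro L
  induction L with
  | nil => intro _ m _ w; rfl
  | cons p L ih =>
      intro h m hm w
      simp only [List.foldl_cons]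
      have hp : p.1 ≠ k := h p (by simp)
      have hm' : (pvIns m p).contains k = true := by
        show (m.insert p.1 p.2).contains k = true
        rw [PySem.Dict.contains_insert, hm, Bool.or_true]
      rw [ih (fun q hq => h q (by simp [hq])) _ hm' w]
      show L.foldl pvIns ((m.insert p.1 p.2).insert k w) = _
      rw [pv_insert_comm m k p.1 hm hp w p.2]
      rfl

-- folding the (value-shifted) items of d.insert equals folding d's items then inserting
theorem pv_step (c : Int) (d : PySem.Dict (String × String) Int) (hnd : d.keys.Nodup)
    (k : String × String) (v : Int) (m : PySem.Dict (String × String) Int) :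
    (((d.insert k v).items).map (pvShift c)).foldl pvIns m
      = ((d.items.map (pvShift c)).foldl pvIns m).insert k (v + c) := by
  by_cases hc : d.contains k = true
  · -- k present: its value is replaced in place
    have hkmem : k ∈ d.keys := (PySem.Dict.contains_iff_mem_keys d k).mp hc
    have : ∃ v₀, (k, v₀) ∈ d.items := by
      have : k ∈ d.items.map Prod.fst := by
        simpa [PySem.Dict.keys] using hkmem
      obtain ⟨q, hq, hq1⟩ := List.mem_map.mp this
      exact ⟨q.2, by rwa [show (k, q.2) = q by rw [← hq1]]⟩
    obtain ⟨v₀, hv₀⟩ := this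
    obtain ⟨pre, post, he⟩ := List.append_of_mem hv₀
    have hnd' : (pre.map Prod.fst ++ k :: post.map Prod.fst).Nodup := by
      have := hnd
      rw [show d.keys = d.items.map Prod.fst from rfl, he] at this
      simpa using this
    have hnds := List.nodup_append.mp hnd'
    have hpre : ∀ q ∈ pre, q.1 ≠ k := fun q hq hqk =>
      hnds.2.2 k (List.mem_map.mpr ⟨q, hq, hqk⟩) k (by simp) rfl
    have hpost : ∀ q ∈ post, q.1 ≠ k := fun q hq hqk =>
      (List.nodup_cons.mp hnds.2.1).1 (List.mem_map.mpr ⟨q, hq, hqk⟩)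
    have hmap : (d.insert k v).items = pre ++ (k, v) :: post := by
      rw [PySem.Dict.items_insert_of_contains d v hc, he, List.map_append, List.map_cons]
      congr 1
      · exact (List.map_congr_left fun q hq => by simp [hpre q hq]).trans (List.map_id pre)
      · congr 1
        · simp
        · exact (List.map_congr_left fun q hq => by simp [hpost q hq]).trans (List.map_id post)
    rw [hmap, he]
    simp only [List.map_append, List.map_cons, List.foldl_append, List.foldl_cons]
    have hbase : ∀ (w : Int),
        pvIns ((pre.map (pvShift c)).foldl pvIns m) (pvShift c (k, w))
          = ((pre.map (pvShift c)).foldl pvIns m).insert k (w + c) := fun _ => rfl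
    rw [hbase v, hbase v₀]
    have hpost' : ∀ p ∈ post.map (pvShift c), p.1 ≠ k := by
      intro p hp
      obtain ⟨q, hq, hqe⟩ := List.mem_map.mp hp
      rw [← hqe]
      exact hpost q hq
    rw [pv_fold_insert k (post.map (pvShift c)) hpost' _
          (PySem.Dict.contains_insert_self _ _ _) (v + c),
        PySem.Dict.insert_insert_self]
  · -- k fresh: the new entry is appended
    have hc' : d.contains k = false := by simpa using hc
    rw [PySem.Dict.items_insert_of_not_contains d v hc']
    simp only [List.map_append, List.foldl_append, List.map_cons, List.map_nil,
      List.foldl_cons, List.foldl_nil]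
    rfl

-- folding the (value-shifted) items of a dict built by pvIns-folding L equals folding L itself
theorem pv_norm (c : Int) :
    ∀ (L : List ((String × String) × Int)) (d m : PySem.Dict (String × String) Int),
      d.keys.Nodup →
      ((L.foldl pvIns d).items.map (pvShift c)).foldl pvIns m
        = (L.map (pvShift c)).foldl pvIns ((d.items.map (pvShift c)).foldl pvIns m) := by
  intro L
  induction L with
  | nil => intro d m _; rfl
  | cons x L ih =>
      intro d m hnd
      simp only [List.foldl_cons, List.map_cons]
      have hnd' : (pvIns d x).keys.Nodup := PySem.Dict.nodup_keys_insert d x.1 x.2 hnd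
      rw [ih (pvIns d x) m hnd']
      congr 1
      rw [show pvIns d x = d.insert x.1 x.2 from rfl, pv_step c d hnd x.1 x.2 m]
      rfl

-- B's recursion builds exactly the pvIns-fold of its entry sequence
theorem pvBAux_eq : ∀ (l : List String), pvBAux l = (pvRowsRec l).foldl pvIns PySem.Dict.empty := by
  intro l
  induction l with
  | nil => rfl
  | cons s0 rest ih =>
      show ((pvBAux rest).items.foldl
              (fun d p => d.insert p.1 (p.2 + ((rest.length : Int) + 1)))
              ((PySem.List.enumerate rest 1).foldl (pvBpair s0)
                (PySem.Dict.empty.insert (s0, s0) 0)))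
          = _
      have hfuse : ∀ (L : List ((String × String) × Int)) (m : PySem.Dict (String × String) Int),
          L.foldl (fun d p => d.insert p.1 (p.2 + ((rest.length : Int) + 1))) m
            = (L.map (pvShift ((rest.length : Int) + 1))).foldl pvIns m := by
        intro L m
        rw [List.foldl_map]
        rfl
      rw [hfuse, pv_enum_fold s0 rest 1, ih,
          pv_norm _ (pvRowsRec rest) PySem.Dict.empty _ List.nodup_nil]
      show _ = (pvRowsRec (s0 :: rest)).foldl pvIns PySem.Dict.empty
      simp only [pvRowsRec, List.foldl_cons, List.foldl_append]
      rfl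

-- ===== VERDICT (by name: the statement is the Claim_ definition above) =====
theorem get_specie_pairs_to_param_index_map_py_spec : Claim_equal_get_specie_pairs_to_param_index_map_py := by
  intro species _
  show _ = _
  simp only [get_specie_pairs_to_param_index_map_py, get_specie_pairs_to_param_index_map_py_alt]
  have htri0 : pvTri 0 species.length = 0 := by norm_num [pvTri, PySem.Int.floordiv]
  have hA := pv_outer_eq species species 0 rfl (by simp) PySem.Dict.empty
  simp only [Nat.cast_zero, htri0] at hA
  rw [hA, pv_rev_fold species, pvBAux_eq species,
      show pvRows species 0 species = pvRowsRec species by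
        rw [pv_rows_rec species species 0 rfl (by simp), htri0, pv_shift_zero]]
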